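-- pv_equiv track=rewrite | github.com/repnz/autoit-analysis | expressions.py | get_number_end
-- ===== SOURCE A (Python) =====
-- def get_number_end(exp):
--     dot_index = -1
--     char_index = -1
--
--     for char_index, char in enumerate(exp):
--         if char == '.':
--             if dot_index != -1:
--                 raise SyntaxError("Number with multiple dots: {exp}".format(
--                     exp=exp
--                 ))
--
--             dot_index = char_index
--
--         elif not char.isdigit():
--             char_index -= 1
--             break
--
--     return char_index+1, dot_index
-- ===== SOURCE B (Python) =====
-- DIGITS_AND_DOT = '0123456789.'
--
-- def get_number_end(exp):
--     # Loop-free: lstrip with the digit/dot charset measures the prefix,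
--     # then bounded count/find handle the dot.
--     end = len(exp) - len(exp.lstrip(DIGITS_AND_DOT))
--     if exp.count('.', 0, end) > 1:
--         raise SyntaxError("Number with multiple dots: {exp}".format(exp=exp))
--     return end, exp.find('.', 0, end)
-- ===== Notes on version B (the rewrite author's own statement) =====
-- stated objective: idiomatic
-- what changed: Replaces A's explicit enumerate loop with stateful dot tracking and a mid-loop raise by loop-free stdlib string operations: lstrip with the digit/dot charset measures the prefix length, then bounded str.count and str.find locate the dot.
import Mathlib
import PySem

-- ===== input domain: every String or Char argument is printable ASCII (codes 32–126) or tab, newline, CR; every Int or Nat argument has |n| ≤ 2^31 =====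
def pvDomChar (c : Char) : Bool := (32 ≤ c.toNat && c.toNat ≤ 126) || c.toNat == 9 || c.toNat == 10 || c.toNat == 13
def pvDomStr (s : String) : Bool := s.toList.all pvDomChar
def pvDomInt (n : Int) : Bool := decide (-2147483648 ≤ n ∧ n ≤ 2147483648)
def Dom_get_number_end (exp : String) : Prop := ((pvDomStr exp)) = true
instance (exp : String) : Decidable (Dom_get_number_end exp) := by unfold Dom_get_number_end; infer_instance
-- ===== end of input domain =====

-- B replaces A's explicit character loop (stateful dot tracking, mid-loop raise) by loop-free
-- stdlib string operations: lstrip with a digit/dot charset measures the prefix, then bounded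
-- count/find handle the dot (idiomatic; return value only — neither version mutates its input).


-- ===== PORT A =====
-- the for-loop over enumerate(exp) with state dot_index; i is the current char_index
def get_number_end_go : List Char → Int → Int → Int × Int
  | [], i, dot => (i, dot)                       -- loop ran off the end: char_index = i-1, return (char_index+1, dot)
  | c :: rest, i, dot =>
    if c = '.' then
      if dot ≠ -1 then (0, 0)                    -- SyntaxError "Number with multiple dots"; excluded by Pre_
      else get_number_end_go rest (i + 1) i      -- dot_index := char_index
    else if c.isDigit then get_number_end_go rest (i + 1) dot
    else (i, dot)                                -- break: char_index -= 1, return (char_index+1, dot)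

def get_number_end (exp : String) : Int × Int :=
  get_number_end_go exp.toList 0 (-1)

-- ===== PORT B =====
def pvDigitsAndDot : List Char := "0123456789.".toList

-- end = len(exp) - len(exp.lstrip(DIGITS_AND_DOT)); lstrip(chars) drops the maximal leading
-- run of chars from the set (ported by hand as dropWhile on membership; exact on this domain)
def pvNumEnd (l : List Char) : Nat :=
  l.length - (l.dropWhile (fun c => pvDigitsAndDot.contains c)).length

def get_number_end_alt (exp : String) : Int × Int :=
  -- exp.count('.', 0, end) / exp.find('.', 0, end): bounded count/find = count/find on the take
  if (exp.toList.take (pvNumEnd exp.toList)).count '.' > 1 then (0, 0)   -- SyntaxError; excluded by Pre_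
  else ((pvNumEnd exp.toList : Int),
        match (exp.toList.take (pvNumEnd exp.toList)).idxOf? '.' with
        | some j => (j : Int)
        | none => -1)

-- ===== PRECONDITION & SPEC =====
-- Pre_ excludes exactly the inputs on which A raises SyntaxError (a second dot inside the
-- leading digit/dot run); B raises there too.
def Pre_get_number_end (exp : String) : Prop :=
  (exp.toList.takeWhile (fun c => c.isDigit || c == '.')).count '.' ≤ 1
instance (exp : String) : Decidable (Pre_get_number_end exp) := by unfold Pre_get_number_end; infer_instance
def pvWitness_get_number_end : String := "3.14"

def Spec_get_number_end (exp : String) (out : Int × Int) : Prop := out = get_number_end_alt exp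
instance (exp : String) (out : Int × Int) : Decidable (Spec_get_number_end exp out) := by unfold Spec_get_number_end; infer_instance

-- ===== CLAIM (what is proved, stated in full; the proofs are below) =====
def Claim_equal_get_number_end : Prop := ∀ (exp : String), Dom_get_number_end exp → Pre_get_number_end exp → Spec_get_number_end exp (get_number_end exp)

-- ===== LEMMAS AND PROOFS =====

theorem pv_toNat_eq (c d : Char) : (c = d) ↔ c.val.toNat = d.val.toNat := by
  constructor
  · rintro rfl; rfl
  · intro h
    apply Char.ext
    exact UInt32.toNat_inj.mp h

-- B's charset membership test agrees with A's isdigit-or-dot test on every Char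
theorem pvDigitsAndDot_mem (c : Char) :
    (pvDigitsAndDot.contains c) = (c.isDigit || c == '.') := by
  have hd : pvDigitsAndDot = ['0','1','2','3','4','5','6','7','8','9','.'] := by decide
  rw [hd, Bool.eq_iff_iff]
  simp only [List.contains_eq_mem, List.mem_cons, List.not_mem_nil, or_false,
    decide_eq_true_eq, Bool.or_eq_true, beq_iff_eq, Char.isDigit,
    Bool.and_eq_true, pv_toNat_eq, UInt32.le_iff_toNat_le, decide_eq_true_eq]
  have h : ('0').val.toNat = 48 ∧ ('1').val.toNat = 49 ∧ ('2').val.toNat = 50 ∧ ('3').val.toNat = 51 ∧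
    ('4').val.toNat = 52 ∧ ('5').val.toNat = 53 ∧ ('6').val.toNat = 54 ∧ ('7').val.toNat = 55 ∧
    ('8').val.toNat = 56 ∧ ('9').val.toNat = 57 ∧ ('.').val.toNat = 46 := by decide
  obtain ⟨a0,a1,a2,a3,a4,a5,a6,a7,a8,a9,ad⟩ := h
  rw [a0,a1,a2,a3,a4,a5,a6,a7,a8,a9,ad]
  omega

-- B's take-of-(len − len·dropWhile) is the takeWhile prefix A walks
theorem pv_take_eq_takeWhile (l : List Char) :
    l.take (pvNumEnd l) = l.takeWhile (fun c => c.isDigit || c == '.') := by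
  unfold pvNumEnd
  have hp : (fun c => pvDigitsAndDot.contains c) = (fun c => c.isDigit || c == '.') := by
    funext c; exact pvDigitsAndDot_mem c
  rw [hp]
  have hlen : (l.takeWhile (fun c => c.isDigit || c == '.')).length
      = l.length - (l.dropWhile (fun c => c.isDigit || c == '.')).length := by
    have := congrArg List.length (List.takeWhile_append_dropWhile
      (p := fun c => c.isDigit || c == '.') (l := l))
    simp only [List.length_append] at this
    omega
  rw [← hlen]
  exact ((List.prefix_iff_eq_take).1 (List.takeWhile_prefix _)).symm

-- The loop of A, started at index i ≥ 0 with a dot budget consistent with the prefix,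
-- returns the takeWhile-prefix length and the (offset) position of its unique dot.
theorem get_number_end_go_eq (l : List Char) (i dot : Int) (hi : 0 ≤ i)
    (h : (l.takeWhile (fun c => c.isDigit || c == '.')).count '.'
          + (if dot = -1 then 0 else 1) ≤ 1) :
    get_number_end_go l i dot =
      ((i + ((l.takeWhile (fun c => c.isDigit || c == '.')).length : Int)),
       match (l.takeWhile (fun c => c.isDigit || c == '.')).idxOf? '.' with
       | some j => i + (j : Int)
       | none => dot) := by
  induction l generalizing i dot with
  | nil => simp [get_number_end_go]
  | cons c rest ih =>
    by_cases hc : c = '.'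
    · subst hc
      have htw : (('.' :: rest).takeWhile (fun c => c.isDigit || c == '.'))
          = '.' :: rest.takeWhile (fun c => c.isDigit || c == '.') := by
        simp [List.takeWhile]
      rw [htw] at h ⊢
      by_cases hd : dot = -1
      · subst hd
        simp only [List.count_cons_self] at h
        have h0 : (rest.takeWhile (fun c => c.isDigit || c == '.')).count '.' = 0 := by
          split at h <;> omega
        have hnm : '.' ∉ rest.takeWhile (fun c => c.isDigit || c == '.') :=
          (List.count_eq_zero).1 h0
        have h1 : List.idxOf? '.' ('.' :: rest.takeWhile (fun c => c.isDigit || c == '.'))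
            = some 0 := by simp [List.idxOf?_cons]
        have h2 : List.idxOf? '.' (rest.takeWhile (fun c => c.isDigit || c == '.')) = none :=
          List.idxOf?_eq_none_iff.2 hnm
        simp only [get_number_end_go, if_neg (show ¬((-1:Int) ≠ -1) by omega)]
        rw [ih (i + 1) i (by omega) (by simp [h0, show i ≠ -1 by omega])]
        rw [h1, h2]
        refine Prod.ext ?_ ?_ <;> simp <;> omega
      · exfalso
        simp only [List.count_cons_self, if_neg hd] at h
        omega
    · by_cases hd : c.isDigit
      · have htw : ((c :: rest).takeWhile (fun c => c.isDigit || c == '.'))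
            = c :: rest.takeWhile (fun c => c.isDigit || c == '.') := by
          simp [List.takeWhile, hd]
        rw [htw] at h ⊢
        have hcount : (c :: rest.takeWhile (fun c => c.isDigit || c == '.')).count '.'
            = (rest.takeWhile (fun c => c.isDigit || c == '.')).count '.' := by
          simp [hc]
        rw [hcount] at h
        have hio : List.idxOf? '.' (c :: rest.takeWhile (fun c => c.isDigit || c == '.'))
            = (List.idxOf? '.' (rest.takeWhile (fun c => c.isDigit || c == '.'))).map (· + 1) := by
          simp [List.idxOf?_cons, hc]
        simp only [get_number_end_go, if_neg hc, if_pos hd]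
        rw [ih (i + 1) dot (by omega) h, hio]
        cases hfind : List.idxOf? '.' (rest.takeWhile (fun c => c.isDigit || c == '.')) with
        | none => refine Prod.ext ?_ ?_ <;> simp <;> omega
        | some j => refine Prod.ext ?_ ?_ <;> simp <;> ring
      · have hb : (c == '.') = false := by simp [hc]
        have htw : ((c :: rest).takeWhile (fun c => c.isDigit || c == '.')) = [] := by
          simp [List.takeWhile, hd, hb]
        rw [htw]
        simp [get_number_end_go, hc, hd]

-- ===== VERDICT (by name: the statement is the Claim_ definition above) =====
theorem get_number_end_spec : Claim_equal_get_number_end := by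
  intro exp _ hpre
  unfold Pre_get_number_end at hpre
  unfold Spec_get_number_end get_number_end get_number_end_alt
  rw [pv_take_eq_takeWhile]
  have h := get_number_end_go_eq exp.toList 0 (-1) le_rfl (by simpa using hpre)
  rw [h]
  rw [if_neg (by omega)]
  have hlen : pvNumEnd exp.toList
      = (exp.toList.takeWhile (fun c => c.isDigit || c == '.')).length := by
    have := congrArg List.length (pv_take_eq_takeWhile exp.toList)
    have hle : pvNumEnd exp.toList ≤ exp.toList.length := Nat.sub_le _ _
    simp only [List.length_take] at this
    omega
  rw [hlen]
  cases hfind : List.idxOf? '.' (exp.toList.takeWhile (fun c => c.isDigit || c == '.')) with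
  | none => simp
  | some j => simp
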